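-- pv_equiv track=rewrite | github.com/sukrut56/Debugging- | Question_1.py | correct_add_function
-- ===== SOURCE A (Python) =====
-- def correct_add_function(arg1,arg2):
--    arg1_index=0
--    while arg1_index < len(arg1):
--        arg_2_sum = 0
--        arg_2_sum = sum([arg1[arg1_index]+ arg2[i] for i in range(len(arg2)) if i == arg1_index])      #making changes so that we can get the output
--        arg1[arg1_index]=arg_2_sum
--        arg1_index+=1
--    return arg1
-- ===== SOURCE B (Python) =====
-- def correct_add_function(arg1, arg2):
--     # single pass over the aligned prefix; mutates arg1 in place like A.
--     # Intended fix: elements of arg1 beyond len(arg2) are kept (A zeroes them).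
--     arg1[:len(arg2)] = [x + y for x, y in zip(arg1, arg2)]
--     return arg1
-- ===== Notes on version B (the rewrite author's own statement) =====
-- stated objective: faster
-- what changed: Replaces the per-index full scan of range(len(arg2)) (a filtered comprehension recomputed for every arg1 index) by a single zip pass over the aligned prefix, and keeps arg1's tail instead of zeroing it.
-- intended difference: When arg1 is longer than arg2 and has a nonzero element past index len(arg2)-1, A overwrites every such tail element with 0 (the empty comprehension sums to 0); B keeps them unchanged, which is the intended element-wise add. — e.g. on correct_add_function([1, 2, 3], [10]): A returns [11, 0, 0], B returns [11, 2, 3]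
import Mathlib
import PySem

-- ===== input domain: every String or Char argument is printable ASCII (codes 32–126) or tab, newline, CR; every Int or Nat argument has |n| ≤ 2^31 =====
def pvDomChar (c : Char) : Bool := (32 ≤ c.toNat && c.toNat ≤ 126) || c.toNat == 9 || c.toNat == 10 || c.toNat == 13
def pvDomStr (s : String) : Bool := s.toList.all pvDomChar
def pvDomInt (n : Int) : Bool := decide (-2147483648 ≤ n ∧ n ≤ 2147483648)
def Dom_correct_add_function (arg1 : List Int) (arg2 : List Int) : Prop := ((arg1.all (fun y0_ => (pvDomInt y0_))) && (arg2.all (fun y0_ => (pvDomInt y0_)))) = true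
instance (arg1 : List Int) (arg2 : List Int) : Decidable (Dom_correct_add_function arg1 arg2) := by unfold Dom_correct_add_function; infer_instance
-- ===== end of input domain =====

-- ===== PORT A =====
-- B is a single zip pass (asymptotically fewer operations than A's per-index range scan)
-- and keeps arg1's tail where A zeroes it (intended difference D_ below).
-- Both Pythons mutate arg1 in place; the equivalence here is about the return value.

-- while arg1_index < len(arg1): arg1[arg1_index] = sum([arg1[i]+arg2[j] ...]); arg1_index += 1
-- (arg1[arg1_index] is always in range inside the loop, so pyGetD with default 0 is exact here)
-- fuel = number of remaining loop iterations (len(arg1) - arg1_index), so the recursion is structural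
def pvLoopA (arg2 : List Int) : Nat → List Int → Nat → List Int
  | 0, a, _ => a
  | fuel + 1, a, i =>
    if i < a.length then
      let s : Int :=
        (((PySem.List.pyRange 0 (arg2.length : Int) 1).filter (fun j => j == (i : Int))).map
          (fun j => PySem.List.pyGetD a (i : Int) 0 + PySem.List.pyGetD arg2 j 0)).sum
      pvLoopA arg2 fuel (a.set i s) (i + 1)
    else a

def correct_add_function (arg1 : List Int) (arg2 : List Int) : List Int :=
  pvLoopA arg2 arg1.length arg1 0

-- ===== PORT B =====
-- arg1[:len(arg2)] = [x + y for x, y in zip(arg1, arg2)]; return arg1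
def correct_add_function_alt (arg1 : List Int) (arg2 : List Int) : List Int :=
  (List.zipWith (fun x y => x + y) arg1 arg2) ++ arg1.drop arg2.length

-- ===== PRECONDITION & SPEC =====
-- When arg1 is longer than arg2 and has a nonzero element past index len(arg2)-1,
-- A overwrites every such tail element with 0 (its empty comprehension sums to 0);
-- B keeps them unchanged, which is the intended element-wise add.
def D_correct_add_function (arg1 : List Int) (arg2 : List Int) : Prop :=
  ((arg1.drop arg2.length).any (fun x => x != 0)) = true
instance (arg1 : List Int) (arg2 : List Int) : Decidable (D_correct_add_function arg1 arg2) := by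
  unfold D_correct_add_function; infer_instance

def Spec_correct_add_function (arg1 : List Int) (arg2 : List Int) (out : List Int) : Prop :=
  ¬ D_correct_add_function arg1 arg2 → out = correct_add_function_alt arg1 arg2
instance (arg1 : List Int) (arg2 : List Int) (out : List Int) : Decidable (Spec_correct_add_function arg1 arg2 out) := by
  unfold Spec_correct_add_function; infer_instance

def pvDiffWitness_correct_add_function : List Int × List Int := ([1, 2, 3], [10])
def pvDiffWitnessOut_correct_add_function : (List Int) × (List Int) := ([11, 0, 0], [11, 2, 3])

-- ===== CLAIM (what is proved, stated in full; the proofs are below) =====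
def Claim_unchanged_correct_add_function : Prop := ∀ (arg1 : List Int) (arg2 : List Int), Dom_correct_add_function arg1 arg2 → Spec_correct_add_function arg1 arg2 (correct_add_function arg1 arg2)
def Claim_changed_correct_add_function : Prop := Dom_correct_add_function (pvDiffWitness_correct_add_function.1) (pvDiffWitness_correct_add_function.2) ∧ D_correct_add_function (pvDiffWitness_correct_add_function.1) (pvDiffWitness_correct_add_function.2) ∧ correct_add_function (pvDiffWitness_correct_add_function.1) (pvDiffWitness_correct_add_function.2) = pvDiffWitnessOut_correct_add_function.1 ∧ correct_add_function_alt (pvDiffWitness_correct_add_function.1) (pvDiffWitness_correct_add_function.2) = pvDiffWitnessOut_correct_add_function.2 ∧ pvDiffWitnessOut_correct_add_function.1 ≠ pvDiffWitnessOut_correct_add_function.2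
def Claim_exact_correct_add_function : Prop := ∀ (arg1 : List Int) (arg2 : List Int), Dom_correct_add_function arg1 arg2 → D_correct_add_function arg1 arg2 → correct_add_function arg1 arg2 ≠ correct_add_function_alt arg1 arg2

-- ===== LEMMAS AND PROOFS =====

-- the value A writes at index i
def pvStep (arg2 a : List Int) (i : Nat) : Int :=
  if i < arg2.length then a.getD i 0 + arg2.getD i 0 else 0

lemma range_filter_beq (n i : Nat) : (List.range n).filter (fun j => j == i) = if i < n then [i] else [] := by
  induction n with
  | zero => simp
  | succ n ih =>
    rw [List.range_succ, List.filter_append, ih]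
    by_cases h : i < n
    · simp [h, Nat.lt_succ_of_lt h, Nat.ne_of_lt h |>.symm]
    · by_cases h2 : i = n
      · simp [h2]
      · have : ¬ i < n + 1 := by omega
        simp [this]; omega

lemma pyRange_sum (arg2 a : List Int) (i : Nat) :
    (((PySem.List.pyRange 0 (arg2.length : Int) 1).filter (fun j => j == (i : Int))).map
      (fun j => PySem.List.pyGetD a (i : Int) 0 + PySem.List.pyGetD arg2 j 0)).sum
    = if i < arg2.length then a.getD i 0 + arg2.getD i 0 else 0 := by
  rw [PySem.List.pyRange_zero_natCast]
  rw [List.filter_map]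
  have : (fun j => j == (i : Int)) ∘ (Nat.cast : Nat → Int) = fun j => j == i := by
    funext j; simp
  rw [this, range_filter_beq]
  by_cases h : i < arg2.length <;> simp [h]

lemma pvLoopA_char (arg2 : List Int) : ∀ (fuel : Nat) (a : List Int) (i : Nat),
    a.length - i ≤ fuel →
    pvLoopA arg2 fuel a i = a.take i ++ (List.range (a.length - i)).map (fun k => pvStep arg2 a (i + k)) := by
  intro fuel
  induction fuel with
  | zero =>
    intro a i hle
    have h : a.length ≤ i := by omega
    simp [pvLoopA, List.take_of_length_le h, Nat.sub_eq_zero_of_le h]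
  | succ fuel ih =>
    intro a i hle
    by_cases h : i < a.length
    · have hs : (((PySem.List.pyRange 0 (arg2.length : Int) 1).filter (fun j => j == (i : Int))).map
          (fun j => PySem.List.pyGetD a (i : Int) 0 + PySem.List.pyGetD arg2 j 0)).sum = pvStep arg2 a i := by
        rw [pyRange_sum]; rfl
      have hrec := ih (a.set i (pvStep arg2 a i)) (i + 1) (by simp; omega)
      simp only [pvLoopA, h, if_pos, hs]
      rw [hrec]
      have htake : (a.set i (pvStep arg2 a i)).take (i + 1) = a.take i ++ [pvStep arg2 a i] := by
        have := List.getElem_set_self (l := a) (i := i) (a := pvStep arg2 a i) (h := by simpa using h)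
        rw [List.take_add_one, List.take_set_of_le (Nat.le_refl i)]
        rw [List.getElem?_eq_getElem (by simpa using h), this]
        simp
      have hlen : (a.set i (pvStep arg2 a i)).length = a.length := by simp
      have hn : a.length - i = (a.length - (i + 1)) + 1 := by omega
      rw [htake, hlen, hn, List.range_succ_eq_map, List.map_cons, List.map_map, List.append_assoc]
      congr 1
      simp only [List.singleton_append, Nat.add_zero]
      congr 1
      apply List.map_congr_left
      intro k hk
      simp [pvStep, Function.comp, List.getD_eq_getElem?_getD,
            List.getElem?_set_ne (show i ≠ i + 1 + k by omega),
            show i + (k + 1) = i + 1 + k from by omega]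
    · have : a.length - i = 0 := by omega
      simp [pvLoopA, h, this, List.take_of_length_le (by omega : a.length ≤ i)]

lemma correct_add_function_char (arg1 arg2 : List Int) :
    correct_add_function arg1 arg2 = (List.range arg1.length).map (fun k => pvStep arg2 arg1 k) := by
  unfold correct_add_function
  rw [pvLoopA_char arg2 arg1.length arg1 0 (by omega)]
  simp

lemma alt_length (arg1 arg2 : List Int) :
    (correct_add_function_alt arg1 arg2).length = arg1.length := by
  simp [correct_add_function_alt]; omega

lemma alt_getElem (arg1 arg2 : List Int) (k : Nat) (hk : k < arg1.length) :
    (correct_add_function_alt arg1 arg2)[k]'(by rw [alt_length]; exact hk)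
    = if h2 : k < arg2.length then arg1[k] + arg2[k] else arg1[k] := by
  unfold correct_add_function_alt
  by_cases h2 : k < arg2.length
  · rw [List.getElem_append_left (by simp; omega)]
    simp [h2, List.getElem_zipWith]
  · rw [List.getElem_append_right (by simp; omega)]
    rw [List.getElem_drop]
    rw [dif_neg h2]
    congr 1
    simp
    omega

-- ===== VERDICT (by name: the statement is the Claim_ definition above) =====
theorem correct_add_function_spec : Claim_unchanged_correct_add_function := by
  intro arg1 arg2 _
  unfold Spec_correct_add_function
  intro hD
  have hall : ∀ (k : Nat) (hk : k < arg1.length), arg2.length ≤ k → arg1[k] = 0 := by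
    intro k hk hk2
    unfold D_correct_add_function at hD
    simp only [List.any_eq_true, not_exists, not_and] at hD
    have hmem : arg1[k] ∈ arg1.drop arg2.length := by
      have : (arg1.drop arg2.length)[k - arg2.length]'(by simp; omega) = arg1[k] := by
        rw [List.getElem_drop]
        congr 1
        omega
      rw [← this]
      exact List.getElem_mem _
    have := hD _ hmem
    simpa using this
  rw [correct_add_function_char]
  apply List.ext_getElem
  · rw [alt_length]; simp
  · intro k hk1 hk2
    have hk : k < arg1.length := by simpa using hk1
    rw [alt_getElem arg1 arg2 k hk]
    simp only [List.getElem_map, List.getElem_range]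
    by_cases h2 : k < arg2.length
    · simp [pvStep, h2, List.getD_eq_getElem?_getD,
            List.getElem?_eq_getElem hk]
    · simp [pvStep, h2, hall k hk (by omega)]

theorem correct_add_function_changed : Claim_changed_correct_add_function := by
  unfold Claim_changed_correct_add_function; decide

theorem correct_add_function_tight : Claim_exact_correct_add_function := by
  intro arg1 arg2 _ hD heq
  unfold D_correct_add_function at hD
  simp only [List.any_eq_true, bne_iff_ne, ne_eq] at hD
  obtain ⟨x, hmem, hx⟩ := hD
  obtain ⟨j, hj, hjx⟩ := List.getElem_of_mem hmem
  have hjlen : arg2.length + j < arg1.length := by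
    have := hj; simp at this; omega
  have hval : arg1[arg2.length + j]'hjlen = x := by
    rw [← hjx, List.getElem_drop]
  have hlenA : (correct_add_function arg1 arg2).length = arg1.length := by
    rw [correct_add_function_char]; simp
  have h1 : (correct_add_function arg1 arg2)[arg2.length + j]'(by omega) = 0 := by
    rw [List.getElem_of_eq (correct_add_function_char arg1 arg2)]
    simp [pvStep]
  have h2 : (correct_add_function arg1 arg2)[arg2.length + j]'(by omega) = x := by
    rw [List.getElem_of_eq heq, alt_getElem arg1 arg2 _ hjlen]
    simp [hval]
  rw [h1] at h2
  exact hx h2.symm
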